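-- pv_equiv track=rewrite | github.com/tietiy/tietiy-scanner | scanner/verify_fixes.py | parse_structured
-- ===== SOURCE A (Python) =====
-- def parse_structured(text):
--     status  = "WARN"
--     finding = text.strip()[:250]
--     risk    = "low"
--     for line in text.splitlines():
--         line = line.strip()
--         if line.startswith("STATUS:"):
--             val = line.split(":", 1)[1].strip().upper()
--             if val in ("PASS", "FAIL", "WARN"):
--                 status = val
--         elif line.startswith("FINDING:"):
--             finding = line.split(":", 1)[1].strip()
--         elif line.startswith("RISK:"):
--             risk = line.split(":", 1)[1].strip().lower()
--     return status, finding, risk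
-- ===== SOURCE B (Python) =====
-- def _tag_value(line, tag):
--     """Stripped value after the first colon if `line` starts with tag, else None."""
--     if line.startswith(tag):
--         return line.split(":", 1)[1].strip()
--     return None
--
--
-- def _status_value(line):
--     v = _tag_value(line, "STATUS:")
--     if v is not None:
--         u = v.upper()
--         if u in ("PASS", "FAIL", "WARN"):
--             return u
--     return None
--
--
-- def _risk_value(line):
--     v = _tag_value(line, "RISK:")
--     if v is not None:
--         return v.lower()
--     return None
--
--
-- def _first_value(lines, extract, default):
--     for ln in lines:
--         v = extract(ln)
--         if v is not None:
--             return v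
--     return default
--
--
-- def parse_structured(text):
--     rlines = [ln.strip() for ln in reversed(text.splitlines())]
--     status = _first_value(rlines, _status_value, "WARN")
--     finding = _first_value(rlines, lambda ln: _tag_value(ln, "FINDING:"),
--                            text.strip()[:250])
--     risk = _first_value(rlines, _risk_value, "low")
--     return status, finding, risk
-- ===== Notes on version B (the rewrite author's own statement) =====
-- stated objective: alternative
-- what changed: Replaces A's single forward pass threading three mutable variables (last write wins) by three independent first-match searches over the reversed stripped lines, one per field, each falling back to its default.
import Mathlib
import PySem

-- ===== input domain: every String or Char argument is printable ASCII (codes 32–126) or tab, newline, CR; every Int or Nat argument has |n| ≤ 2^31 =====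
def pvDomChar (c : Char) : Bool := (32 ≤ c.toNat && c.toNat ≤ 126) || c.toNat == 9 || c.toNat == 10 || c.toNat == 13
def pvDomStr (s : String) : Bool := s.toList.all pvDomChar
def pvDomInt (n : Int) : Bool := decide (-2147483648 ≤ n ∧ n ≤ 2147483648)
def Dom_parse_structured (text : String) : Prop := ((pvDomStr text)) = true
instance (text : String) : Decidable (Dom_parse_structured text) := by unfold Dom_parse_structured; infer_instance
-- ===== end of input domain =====

-- B replaces A's forward pass threading three variables by three independent
-- first-match searches over the reversed stripped lines (alternative, same cost).

-- ===== PORT A =====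
-- line.split(":", 1)[1] — under the startswith guard the list always has a second
-- element, so the .getD "" defaults are unreachable; exact where reached.
def pvAfterColon (line : String) : String :=
  (((PySem.Str.splitMax? line ":" 1).getD []).getD 1 "")

def pvLineStep (acc : String × String × String) (rawline : String) : String × String × String :=
  let line := PySem.Str.strip rawline
  if PySem.Str.startswith line "STATUS:" then
    let val := PySem.Str.upper (PySem.Str.strip (pvAfterColon line))
    if val = "PASS" ∨ val = "FAIL" ∨ val = "WARN" then (val, acc.2.1, acc.2.2) else acc
  else if PySem.Str.startswith line "FINDING:" then
    (acc.1, PySem.Str.strip (pvAfterColon line), acc.2.2)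
  else if PySem.Str.startswith line "RISK:" then
    (acc.1, acc.2.1, PySem.Str.lower (PySem.Str.strip (pvAfterColon line)))
  else acc

def parse_structured (text : String) : String × String × String :=
  let status : String := "WARN"
  let finding : String := PySem.Str.slice (PySem.Str.strip text) none (some 250)
  let risk : String := "low"
  (PySem.Str.splitlines text).foldl pvLineStep (status, finding, risk)

-- ===== PORT B =====
def pvTagValue (line tag : String) : Option String :=
  if PySem.Str.startswith line tag then
    some (PySem.Str.strip (pvAfterColon line))
  else none

def pvStatusValue (line : String) : Option String :=
  match pvTagValue line "STATUS:" with
  | some v =>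
      let u := PySem.Str.upper v
      if u = "PASS" ∨ u = "FAIL" ∨ u = "WARN" then some u else none
  | none => none

def pvRiskValue (line : String) : Option String :=
  match pvTagValue line "RISK:" with
  | some v => some (PySem.Str.lower v)
  | none => none

def pvFirstValue (lines : List String) (extract : String → Option String) (default : String) : String :=
  match lines with
  | [] => default
  | l :: t =>
      match extract l with
      | some v => v
      | none => pvFirstValue t extract default

def parse_structured_alt (text : String) : String × String × String :=
  let rlines := ((PySem.Str.splitlines text).reverse).map PySem.Str.strip
  let status := pvFirstValue rlines pvStatusValue "WARN"
  let finding := pvFirstValue rlines (fun ln => pvTagValue ln "FINDING:")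
      (PySem.Str.slice (PySem.Str.strip text) none (some 250))
  let risk := pvFirstValue rlines pvRiskValue "low"
  (status, finding, risk)

-- ===== PRECONDITION & SPEC =====
def Spec_parse_structured (text : String) (out : String × String × String) : Prop := out = parse_structured_alt text
instance (text : String) (out : String × String × String) : Decidable (Spec_parse_structured text out) := by unfold Spec_parse_structured; infer_instance

-- ===== CLAIM (what is proved, stated in full; the proofs are below) =====
def Claim_equal_parse_structured : Prop := ∀ (text : String), Dom_parse_structured text → Spec_parse_structured text (parse_structured text)

-- ===== LEMMAS AND PROOFS =====

-- a string cannot start with two tags whose first characters differ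
theorem pv_excl (l p q : String) (a b : Char) (ha : p.toList.head? = some a)
    (hb : q.toList.head? = some b) (hab : a ≠ b)
    (h : PySem.Str.startswith l p = true) : PySem.Str.startswith l q = false := by
  by_contra hqq
  rw [Bool.not_eq_false] at hqq
  rw [PySem.Str.startswith_eq, PySem.Chars.startswith_iff] at h hqq
  obtain ⟨t1, e1⟩ := h
  obtain ⟨t2, e2⟩ := hqq
  have h1 : l.toList.head? = some a := by
    rw [← e1]
    cases hp : p.toList with
    | nil => rw [hp] at ha; simp at ha
    | cons c tc => rw [hp] at ha; simp at ha; simp [ha]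
  have h2 : l.toList.head? = some b := by
    rw [← e2]
    cases hq : q.toList with
    | nil => rw [hq] at hb; simp at hb
    | cons c tc => rw [hq] at hb; simp at hb; simp [hb]
  rw [h1] at h2
  simp at h2
  exact hab h2

-- pvLineStep acts componentwise
theorem pvLineStep_eq (acc : String × String × String) (raw : String) :
    pvLineStep acc raw =
      ((pvStatusValue (PySem.Str.strip raw)).getD acc.1,
       (pvTagValue (PySem.Str.strip raw) "FINDING:").getD acc.2.1,
       (pvRiskValue (PySem.Str.strip raw)).getD acc.2.2) := by
  unfold pvLineStep pvStatusValue pvRiskValue pvTagValue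
  set l := PySem.Str.strip raw with hl
  by_cases hs : PySem.Str.startswith l "STATUS:" = true
  · have hf : PySem.Str.startswith l "FINDING:" = false :=
      pv_excl l "STATUS:" "FINDING:" 'S' 'F' rfl rfl (by decide) hs
    have hr : PySem.Str.startswith l "RISK:" = false :=
      pv_excl l "STATUS:" "RISK:" 'S' 'R' rfl rfl (by decide) hs
    simp only [hs, hf, hr, if_true, Bool.false_eq_true, if_false]
    by_cases hv : PySem.Str.upper (PySem.Str.strip (pvAfterColon l)) = "PASS" ∨
        PySem.Str.upper (PySem.Str.strip (pvAfterColon l)) = "FAIL" ∨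
        PySem.Str.upper (PySem.Str.strip (pvAfterColon l)) = "WARN"
    · simp [hv]
    · simp [hv]
  · rw [Bool.not_eq_true] at hs
    simp only [hs, Bool.false_eq_true, if_false]
    by_cases hf : PySem.Str.startswith l "FINDING:" = true
    · have hr : PySem.Str.startswith l "RISK:" = false :=
        pv_excl l "FINDING:" "RISK:" 'F' 'R' rfl rfl (by decide) hf
      simp at hf hr
      simp [hf, hr]
    · rw [Bool.not_eq_true] at hf
      by_cases hr : PySem.Str.startswith l "RISK:" = true
      · simp at hf hr
        simp [hf, hr]
      · rw [Bool.not_eq_true] at hr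
        simp at hf hr
        simp [hf, hr]

-- pvFirstValue over a mapped list
theorem pvFirstValue_map (xs : List String) (h : String → String)
    (f : String → Option String) (d : String) :
    pvFirstValue (xs.map h) f d = pvFirstValue xs (fun x => f (h x)) d := by
  induction xs with
  | nil => rfl
  | cons a t ih =>
    simp only [List.map, pvFirstValue]
    cases f (h a) <;> simp [ih]

-- appending one element at the back folds into the default
theorem pvFirstValue_append (ys : List String) (l : String)
    (f : String → Option String) (d : String) :
    pvFirstValue (ys ++ [l]) f d = pvFirstValue ys f ((f l).getD d) := by
  induction ys with
  | nil =>
    simp only [List.nil_append, pvFirstValue]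
    cases f l <;> rfl
  | cons a t ih =>
    simp only [List.cons_append, pvFirstValue]
    cases f a <;> simp [ih]

-- last-wins forward fold = first-match over the reversed list
theorem pv_foldl_eq_first (xs : List String) (f : String → Option String) (d : String) :
    xs.foldl (fun a l => (f l).getD a) d = pvFirstValue xs.reverse f d := by
  induction xs generalizing d with
  | nil => rfl
  | cons l t ih =>
    simp only [List.foldl, List.reverse_cons]
    rw [ih, pvFirstValue_append]

-- the tuple fold splits into three independent folds
theorem pv_foldl_triple (xs : List String) (s f r : String) :
    xs.foldl pvLineStep (s, f, r) =
      (xs.foldl (fun a l => (pvStatusValue (PySem.Str.strip l)).getD a) s,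
       xs.foldl (fun a l => (pvTagValue (PySem.Str.strip l) "FINDING:").getD a) f,
       xs.foldl (fun a l => (pvRiskValue (PySem.Str.strip l)).getD a) r) := by
  induction xs generalizing s f r with
  | nil => rfl
  | cons a t ih =>
    simp only [List.foldl]
    rw [pvLineStep_eq (s, f, r) a, ih]

-- ===== VERDICT (by name: the statement is the Claim_ definition above) =====
theorem parse_structured_spec : Claim_equal_parse_structured := by
  intro text _
  unfold Spec_parse_structured parse_structured parse_structured_alt
  simp only []
  rw [pv_foldl_triple]
  rw [pv_foldl_eq_first, pv_foldl_eq_first, pv_foldl_eq_first]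
  rw [pvFirstValue_map, pvFirstValue_map, pvFirstValue_map]
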